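-- pv_equiv track=rewrite | github.com/RolfSievert/litter-det | tools/split_dataset.py | get_image_histograms
-- ===== SOURCE A (Python) =====
-- def get_image_histograms(annotations, n_categories):
--     """
--     Build a histogram of categories for each image.
--     """
--     image_hist = {}
--     for a in annotations:
--         image_id = a['image_id']
--         a_cat = a['category_id']
--         # create histogram if non-existent
--         if image_id not in image_hist:
--             image_hist[image_id] = [0 for _ in range(n_categories)]
--         image_hist[image_id][a_cat] += 1
--     return image_hist
-- ===== SOURCE B (Python) =====
-- def get_image_histograms(annotations, n_categories):
--     """
--     Build a histogram of categories for each image.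
--
--     Two-phase: first group the category ids per image (first-seen order),
--     then build each image's histogram from its group.
--     """
--     groups = {}
--     for a in annotations:
--         groups.setdefault(a['image_id'], []).append(a['category_id'])
--     return {image_id: _histogram(cats, n_categories)
--             for image_id, cats in groups.items()}
--
--
-- def _histogram(cats, n_categories):
--     hist = [0] * n_categories
--     for cat in cats:
--         hist[cat] += 1
--     return hist
-- ===== Notes on version B (the rewrite author's own statement) =====
-- stated objective: alternative
-- what changed: A scatters every annotation directly into the per-image histogram dict in one pass; B first groups category_ids per image with setdefault, then builds each image's histogram in a separate per-group pass via a dict comprehension.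
import Mathlib
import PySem

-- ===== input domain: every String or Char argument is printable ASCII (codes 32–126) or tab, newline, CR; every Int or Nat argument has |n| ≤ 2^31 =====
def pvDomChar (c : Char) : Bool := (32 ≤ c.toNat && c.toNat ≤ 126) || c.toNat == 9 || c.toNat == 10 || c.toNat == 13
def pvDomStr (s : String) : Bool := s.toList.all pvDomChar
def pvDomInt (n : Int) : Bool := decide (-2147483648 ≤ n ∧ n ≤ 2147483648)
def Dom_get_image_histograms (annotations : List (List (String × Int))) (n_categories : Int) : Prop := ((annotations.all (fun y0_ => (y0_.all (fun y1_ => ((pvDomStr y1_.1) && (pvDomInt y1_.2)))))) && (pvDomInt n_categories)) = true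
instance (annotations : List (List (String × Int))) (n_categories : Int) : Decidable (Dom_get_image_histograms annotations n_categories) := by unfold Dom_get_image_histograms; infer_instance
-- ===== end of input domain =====

-- B re-decomposes A's single scatter loop into a group-by pass plus a per-image
-- histogram pass (objective: alternative decomposition, same cost; return value only).

-- ===== PORT A =====
-- loop body of A (one annotation: look up keys, create histogram if absent, increment a_cat slot)
def pvStepA (n_categories : Int) (image_hist : PySem.Dict Int (List Int)) (a : List (String × Int)) : PySem.Dict Int (List Int) :=
  match PySem.Dict.get? (PySem.Dict.mk a) "image_id", PySem.Dict.get? (PySem.Dict.mk a) "category_id" with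
  | some image_id, some a_cat =>
      let hist1 := if image_hist.contains image_id then image_hist
        else image_hist.insert image_id ((PySem.List.pyRange 0 n_categories 1).map (fun _ => (0 : Int)))
      -- image_hist[image_id][a_cat] += 1 (in-place on the stored list; KeyError/IndexError excluded by Pre_)
      PySem.Dict.modify hist1 image_id []
        (fun l => PySem.List.pySetD l a_cat (PySem.List.pyGetD l a_cat 0 + 1))
  | _, _ => image_hist  -- missing key: Python raises KeyError (excluded by Pre_)

def get_image_histograms (annotations : List (List (String × Int))) (n_categories : Int) : List (Int × List Int) :=
  (annotations.foldl (pvStepA n_categories) PySem.Dict.empty).items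

-- ===== PORT B =====
-- _histogram helper of Source B
def pvHistogram (cats : List Int) (n_categories : Int) : List Int :=
  cats.foldl (fun hist cat => PySem.List.pySetD hist cat (PySem.List.pyGetD hist cat 0 + 1))
    (List.replicate n_categories.toNat 0)

-- loop body of B's grouping pass: groups.setdefault(a['image_id'], []).append(a['category_id'])
def pvStepB (groups : PySem.Dict Int (List Int)) (a : List (String × Int)) : PySem.Dict Int (List Int) :=
  match PySem.Dict.get? (PySem.Dict.mk a) "image_id", PySem.Dict.get? (PySem.Dict.mk a) "category_id" with
  | some image_id, some cat =>
      PySem.Dict.modify (PySem.Dict.setdefault groups image_id []) image_id [] (· ++ [cat])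
  | _, _ => groups  -- missing key: Python raises KeyError (excluded by Pre_)

def get_image_histograms_alt (annotations : List (List (String × Int))) (n_categories : Int) : List (Int × List Int) :=
  let groups := annotations.foldl pvStepB PySem.Dict.empty
  groups.items.map (fun p => (p.1, pvHistogram p.2 n_categories))

-- ===== PRECONDITION & SPEC =====
-- Pre_ excludes exactly the inputs where Python A raises: an annotation missing the
-- 'image_id' or 'category_id' key (KeyError) or a category_id outside the Python
-- index range of the length-n_categories histogram list (IndexError).
def Pre_get_image_histograms (annotations : List (List (String × Int))) (n_categories : Int) : Prop :=
  ∀ a ∈ annotations,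
    (PySem.Dict.get? (PySem.Dict.mk a) "image_id").isSome = true ∧
    (PySem.Dict.get? (PySem.Dict.mk a) "category_id").isSome = true ∧
    (PySem.Dict.get? (PySem.Dict.mk a) "category_id").all
      (fun c => decide (PySem.Raise.InRange n_categories.toNat c)) = true
instance (annotations : List (List (String × Int))) (n_categories : Int) : Decidable (Pre_get_image_histograms annotations n_categories) := by unfold Pre_get_image_histograms; infer_instance

def pvWitness_get_image_histograms : (List (List (String × Int))) × Int :=
  ([[("image_id", 1), ("category_id", 0)], [("image_id", 2), ("category_id", 1)], [("image_id", 1), ("category_id", 1)]], 2)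

def Spec_get_image_histograms (annotations : List (List (String × Int))) (n_categories : Int) (out : List (Int × List Int)) : Prop := out = get_image_histograms_alt annotations n_categories
instance (annotations : List (List (String × Int))) (n_categories : Int) (out : List (Int × List Int)) : Decidable (Spec_get_image_histograms annotations n_categories out) := by unfold Spec_get_image_histograms; infer_instance

-- ===== CLAIM (what is proved, stated in full; the proofs are below) =====
def Claim_equal_get_image_histograms : Prop := ∀ (annotations : List (List (String × Int))) (n_categories : Int), Dom_get_image_histograms annotations n_categories → Pre_get_image_histograms annotations n_categories → Spec_get_image_histograms annotations n_categories (get_image_histograms annotations n_categories)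

-- ===== LEMMAS AND PROOFS =====

-- proof-side view: A's dict is B's grouping dict with every group rendered into its histogram
def pvRender (n : Int) (p : Int × List Int) : Int × List Int := (p.1, pvHistogram p.2 n)
def pvRenderD (n : Int) (G : PySem.Dict Int (List Int)) : PySem.Dict Int (List Int) :=
  PySem.Dict.mk (G.items.map (pvRender n))

theorem contains_renderD (n : Int) (G : PySem.Dict Int (List Int)) (k : Int) :
    (pvRenderD n G).contains k = G.contains k := by
  simp only [pvRenderD, PySem.Dict.contains, List.any_map]
  rfl

theorem get?_renderD (n : Int) (G : PySem.Dict Int (List Int)) (k : Int) :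
    (pvRenderD n G).get? k = (G.get? k).map (fun v => pvHistogram v n) := by
  simp only [pvRenderD, PySem.Dict.get?, List.find?_map, Option.map_map]
  rfl

theorem insert_renderD (n : Int) (G : PySem.Dict Int (List Int)) (k : Int) (v : List Int) :
    (pvRenderD n G).insert k (pvHistogram v n) = pvRenderD n (G.insert k v) := by
  unfold PySem.Dict.insert
  rw [contains_renderD]
  by_cases h : G.contains k = true
  · rw [if_pos h, if_pos h]
    apply PySem.Dict.ext
    simp only [pvRenderD, List.map_map]
    refine List.map_congr_left fun p _ => ?_
    by_cases hpk : p.1 = k <;> simp [pvRender, hpk]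
  · rw [if_neg h, if_neg h]
    apply PySem.Dict.ext
    simp [pvRenderD, pvRender]

theorem hist_append (n : Int) (v : List Int) (c : Int) :
    pvHistogram (v ++ [c]) n
      = PySem.List.pySetD (pvHistogram v n) c (PySem.List.pyGetD (pvHistogram v n) c 0 + 1) := by
  simp [pvHistogram, List.foldl_append]

theorem zeros_eq (n : Int) :
    (PySem.List.pyRange 0 n 1).map (fun _ => (0 : Int)) = List.replicate n.toNat 0 := by
  rw [List.map_const']
  simp [PySem.List.length_pyRange_one]

theorem step_eq (n : Int) (G : PySem.Dict Int (List Int)) (a : List (String × Int)) :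
    pvStepA n (pvRenderD n G) a = pvRenderD n (pvStepB G a) := by
  unfold pvStepA pvStepB
  cases h1 : PySem.Dict.get? (PySem.Dict.mk a) "image_id" with
  | none => cases h2 : PySem.Dict.get? (PySem.Dict.mk a) "category_id" <;> rfl
  | some iid =>
    cases h2 : PySem.Dict.get? (PySem.Dict.mk a) "category_id" with
    | none => rfl
    | some cat =>
      simp only [contains_renderD]
      by_cases hc : G.contains iid = true
      · have hv : (G.get? iid).isSome := by
          rw [PySem.Dict.contains_eq_isSome_get?] at hc; exact hc
        obtain ⟨v, hv⟩ := Option.isSome_iff_exists.mp hv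
        rw [if_pos hc, PySem.Dict.setdefault_of_contains _ _ hc]
        rw [PySem.Dict.modify, PySem.Dict.modify]
        rw [PySem.Dict.getD_eq_get?_getD, get?_renderD, hv]
        rw [PySem.Dict.getD_eq_get?_getD, hv]
        simp only [Option.map_some, Option.getD_some]
        rw [← hist_append, insert_renderD]
      · have hc' : G.contains iid = false := by simpa using hc
        rw [if_neg hc, PySem.Dict.setdefault_of_not_contains _ _ hc']
        have hz : (pvRenderD n G).insert iid ((PySem.List.pyRange 0 n 1).map (fun _ => (0 : Int)))
            = pvRenderD n (G.insert iid []) := by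
          rw [zeros_eq]
          have h0 : List.replicate n.toNat (0 : Int) = pvHistogram [] n := by simp [pvHistogram]
          rw [h0, insert_renderD]
        rw [hz, PySem.Dict.modify, PySem.Dict.modify]
        rw [PySem.Dict.getD_eq_get?_getD, get?_renderD, PySem.Dict.get?_insert_self]
        rw [PySem.Dict.getD_eq_get?_getD, PySem.Dict.get?_insert_self]
        simp only [Option.map_some, Option.getD_some, List.nil_append]
        rw [← hist_append, insert_renderD, PySem.Dict.insert_insert_self, PySem.Dict.insert_insert_self]
        simp

theorem fold_eq (n : Int) (xs : List (List (String × Int))) (G : PySem.Dict Int (List Int)) :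
    xs.foldl (pvStepA n) (pvRenderD n G) = pvRenderD n (xs.foldl pvStepB G) := by
  induction xs generalizing G with
  | nil => rfl
  | cons a xs ih => rw [List.foldl_cons, List.foldl_cons, step_eq, ih]

-- ===== VERDICT (by name: the statement is the Claim_ definition above) =====
theorem get_image_histograms_spec : Claim_equal_get_image_histograms := by
  intro annotations n_categories _ _
  unfold Spec_get_image_histograms get_image_histograms get_image_histograms_alt
  have h : annotations.foldl (pvStepA n_categories) PySem.Dict.empty
      = pvRenderD n_categories (annotations.foldl pvStepB PySem.Dict.empty) :=
    fold_eq n_categories annotations PySem.Dict.empty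
  rw [h]
  rfl
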